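-- pv_equiv track=rewrite | github.com/OpenPecha/archived | generic-edition-generator/v2/matrix_weigher.py | is_the_same_token
-- ===== SOURCE A (Python) =====
-- def is_the_same_token(tokens):
--     first_token_string = None
--     for token in tokens:
--         if token is None:
--             # if there's a gap, then not all the tokens are the same, by design
--             return False
--         if first_token_string is None:
--             first_token_string = token[3]
--         elif token[3] != first_token_string:
--             return False
--     return True
-- ===== SOURCE B (Python) =====
-- def is_the_same_token(tokens):
--     if not all(t is not None for t in tokens):
--         return False
--     vals = {t[3] for t in tokens}
--     return len(vals) <= 1
-- ===== Notes on version B (the rewrite author's own statement) =====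
-- stated objective: simpler
-- what changed: Replaces A's single loop with a running first-value comparison and early returns by two whole-list passes: an all() None-check followed by a set comprehension of the field-3 values whose cardinality (<= 1) decides sameness.
import Mathlib
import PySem

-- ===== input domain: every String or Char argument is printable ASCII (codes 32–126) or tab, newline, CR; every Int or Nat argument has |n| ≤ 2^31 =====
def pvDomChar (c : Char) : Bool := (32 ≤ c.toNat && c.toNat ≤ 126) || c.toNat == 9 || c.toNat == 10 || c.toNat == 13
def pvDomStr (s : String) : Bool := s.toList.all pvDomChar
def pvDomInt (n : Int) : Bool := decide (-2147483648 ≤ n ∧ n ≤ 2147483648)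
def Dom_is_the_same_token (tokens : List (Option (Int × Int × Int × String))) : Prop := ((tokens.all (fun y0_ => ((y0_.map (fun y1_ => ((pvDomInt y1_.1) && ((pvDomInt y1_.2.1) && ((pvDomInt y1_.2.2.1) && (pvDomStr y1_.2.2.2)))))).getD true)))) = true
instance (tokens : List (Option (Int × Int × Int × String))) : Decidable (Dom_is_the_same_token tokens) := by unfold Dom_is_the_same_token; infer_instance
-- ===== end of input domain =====

-- B replaces A's single loop carrying a running "first value" (with early returns) by two
-- whole-list passes: an all()-style None check, then a set of the field-3 values whose
-- cardinality (≤ 1) decides sameness; same O(n) cost, objective: simpler.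

-- ===== PORT A =====
-- the for-loop of A, with the running `first_token_string` as explicit state
def isTokLoopA (first : Option String) : List (Option (Int × Int × Int × String)) → Bool
  | [] => true
  | t :: rest =>
    match t with
    | none => false
    | some tok =>
      match first with
      | none => isTokLoopA (some tok.2.2.2) rest
      | some f => if tok.2.2.2 ≠ f then false else isTokLoopA (some f) rest

def is_the_same_token (tokens : List (Option (Int × Int × Int × String))) : Bool :=
  isTokLoopA none tokens

-- ===== PORT B =====
def is_the_same_token_alt (tokens : List (Option (Int × Int × Int × String))) : Bool :=
  if tokens.all (fun t => t.isSome) then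
    decide (PySem.Set.len (PySem.Set.ofList
      (tokens.filterMap (fun t => t.map (fun x => x.2.2.2)))) ≤ 1)
  else false

-- ===== PRECONDITION & SPEC =====
def Spec_is_the_same_token (tokens : List (Option (Int × Int × Int × String))) (out : Bool) : Prop := out = is_the_same_token_alt tokens
instance (tokens : List (Option (Int × Int × Int × String))) (out : Bool) : Decidable (Spec_is_the_same_token tokens out) := by unfold Spec_is_the_same_token; infer_instance

-- ===== CLAIM (what is proved, stated in full; the proofs are below) =====
def Claim_equal_is_the_same_token : Prop := ∀ (tokens : List (Option (Int × Int × Int × String))), Dom_is_the_same_token tokens → Spec_is_the_same_token tokens (is_the_same_token tokens)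

-- ===== LEMMAS AND PROOFS =====

-- folding Set.add never shrinks the set
lemma foldl_add_len_mono (vs : List String) : ∀ (s : List String),
    s.length ≤ (vs.foldl PySem.Set.add s).length := by
  induction vs with
  | nil => intro s; simp
  | cons v vs ih =>
    intro s
    have h1 : s.length ≤ (PySem.Set.add s v).length := by
      unfold PySem.Set.add; split <;> simp
    exact le_trans h1 (ih _)

-- the set \{f\} absorbs vs iff every element of vs equals f
lemma foldl_add_singleton (f : String) : ∀ (vs : List String),
    (decide (PySem.Set.len (vs.foldl PySem.Set.add [f]) ≤ 1)) = vs.all (fun x => x == f) := by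
  intro vs
  induction vs with
  | nil => simp [PySem.Set.len]
  | cons v vs ih =>
    rw [List.foldl_cons]
    by_cases hv : v = f
    · subst hv
      have hc : PySem.Set.contains [v] v = true := by
        rw [PySem.Set.contains_iff]; simp
      have hadd : PySem.Set.add [v] v = [v] := by
        unfold PySem.Set.add; rw [if_pos hc]
      rw [hadd, ih, List.all_cons]
      simp
    · have hc : ¬ (PySem.Set.contains [f] v = true) := by
        rw [PySem.Set.contains_iff]; simp [hv]
      have hadd : PySem.Set.add [f] v = [f, v] := by
        unfold PySem.Set.add; rw [if_neg hc]; rfl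
      rw [hadd]
      have hlen : 2 ≤ (vs.foldl PySem.Set.add [f, v]).length := by
        have := foldl_add_len_mono vs [f, v]
        simpa using this
      have hfalse : ¬ ((vs.foldl PySem.Set.add [f, v]).length ≤ 1) := by omega
      rw [List.all_cons]
      simp [PySem.Set.len, hfalse, hv]

-- A's loop with a fixed first value checks every remaining token against it
lemma isTokLoopA_some (f : String) : ∀ (rest : List (Option (Int × Int × Int × String))),
    isTokLoopA (some f) rest
      = rest.all (fun t => (t.map (fun x => x.2.2.2)) == some f) := by
  intro rest
  induction rest with
  | nil => rfl
  | cons t rest ih =>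
    cases t with
    | none => simp [isTokLoopA]
    | some tok =>
      by_cases h : tok.2.2.2 = f
      · simp [isTokLoopA, h, ih]
      · simp [isTokLoopA, h]

-- element-wise check against f = (no Nones) ∧ (all extracted values equal f)
lemma all_eq_some_split (f : String) : ∀ (rest : List (Option (Int × Int × Int × String))),
    rest.all (fun t => (t.map (fun x => x.2.2.2)) == some f)
      = (rest.all (fun t => t.isSome)
          && (rest.filterMap (fun t => t.map (fun x => x.2.2.2))).all (fun x => x == f)) := by
  intro rest
  induction rest with
  | nil => rfl
  | cons t rest ih =>
    cases t with
    | none => simp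
    | some tok =>
      rw [Bool.eq_iff_iff]
      simp only [List.all_cons, List.filterMap_cons, Option.map_some, Option.isSome_some,
        Bool.and_eq_true, beq_iff_eq, Option.some.injEq] at *
      rw [ih]
      simp only [Bool.and_eq_true]
      tauto

-- ===== VERDICT (by name: the statement is the Claim_ definition above) =====
theorem is_the_same_token_spec : Claim_equal_is_the_same_token := by
  intro tokens _
  unfold Spec_is_the_same_token is_the_same_token is_the_same_token_alt
  cases tokens with
  | nil => simp [isTokLoopA, PySem.Set.ofList, PySem.Set.empty, PySem.Set.len]
  | cons t rest =>
    cases t with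
    | none => simp [isTokLoopA]
    | some tok =>
      simp only [isTokLoopA]
      rw [isTokLoopA_some, all_eq_some_split]
      by_cases h : rest.all (fun t => t.isSome) = true
      · have hcond : (some tok :: rest).all (fun t => t.isSome) = true := by
          simp [h]
        rw [if_pos hcond]
        have hfm : (some tok :: rest).filterMap (fun t => t.map (fun x => x.2.2.2))
            = tok.2.2.2 :: rest.filterMap (fun t => t.map (fun x => x.2.2.2)) := by
          simp
        rw [hfm]
        have hof : PySem.Set.ofList
            (tok.2.2.2 :: rest.filterMap (fun t => t.map (fun x => x.2.2.2)))
            = (rest.filterMap (fun t => t.map (fun x => x.2.2.2))).foldl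
                PySem.Set.add [tok.2.2.2] := by
          simp [PySem.Set.ofList, PySem.Set.add, PySem.Set.empty, PySem.Set.contains]
        rw [hof, foldl_add_singleton, h]
        simp
      · have hcond : ¬ ((some tok :: rest).all (fun t => t.isSome) = true) := by
          simp_all
        rw [if_neg hcond]
        simp_all
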